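-- pv_equiv track=rewrite | github.com/guilourenco-dev/Projects | Projetos FP/FP2425P1.py | obtem_coluna
-- ===== SOURCE A (Python) =====
-- def obtem_dimensao(tabuleiro):
--     """
--     Descrição:
--     Recebe um tabuleiro(tuplo de tuplos de inteiros entre -1, 0 e 1, e de tamanho correto)
--     Retorna as dimensões do tabuleiro (m, n)
--     """
--     m = len(tabuleiro)              # Número de linhas do tabuleiro
--     n = len(tabuleiro[0])           # Número de colunas do tabuleiro
--     return (m, n)
--
-- def obtem_coluna(tabuleiro, posicao):
--     """
--     Descrição:
--     Recebe um tabuleiro(tuplo de tuplos de inteiros entre -1, 0 e 1, e de tamanho correto) e uma posição desse tabuleiro(int)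
--     Retorna as posições de uma coluna específicaa no tabuleiro, em relação a uma posição dada.
--     """
--
--     m,n = obtem_dimensao(tabuleiro)          # Número de linhas e colunas do tabuleiro
--     if posicao > m:                # Verificar se a posição dada pertence à 1º linha. Caso não pertença, passa-la para a 1ª linha
--         indice_coluna = posicao - n
--     else:
--         indice_coluna = posicao
--
--     coluna = (indice_coluna,)
--     for valor in range(m - 1):
--         coluna += ((coluna[valor] + n),)
--
--     return coluna
-- ===== SOURCE B (Python) =====
-- def obtem_coluna(tabuleiro, posicao):
--     n = len(tabuleiro[0])
--     inicio = posicao - n if posicao > len(tabuleiro) else posicao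
--
--     def resto(linhas, indice):
--         if not linhas:
--             return ()
--         return (indice,) + resto(linhas[1:], indice + n)
--
--     return resto(tabuleiro, inicio)
-- ===== Notes on version B (the rewrite author's own statement) =====
-- stated objective: alternative
-- what changed: Replaces A's index loop over range(m-1) that grows a tuple by reading back its own previous element (coluna[valor] + n) with structural recursion over the board's rows, threading the current index and emitting one index per row with no tuple indexing or length arithmetic in the loop.
import Mathlib
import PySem

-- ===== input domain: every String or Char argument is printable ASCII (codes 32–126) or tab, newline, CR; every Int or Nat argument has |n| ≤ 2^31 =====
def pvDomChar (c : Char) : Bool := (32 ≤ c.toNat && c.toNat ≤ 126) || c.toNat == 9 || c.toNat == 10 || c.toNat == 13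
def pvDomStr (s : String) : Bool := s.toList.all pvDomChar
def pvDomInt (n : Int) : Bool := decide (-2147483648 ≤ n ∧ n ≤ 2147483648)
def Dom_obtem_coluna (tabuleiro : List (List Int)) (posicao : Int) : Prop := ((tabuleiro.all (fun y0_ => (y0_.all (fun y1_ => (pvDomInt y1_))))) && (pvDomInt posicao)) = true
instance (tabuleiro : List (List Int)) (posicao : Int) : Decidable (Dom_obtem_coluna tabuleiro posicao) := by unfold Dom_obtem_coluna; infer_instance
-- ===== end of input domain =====

-- B replaces A's index loop (next index read back from the previous tuple element)
-- with structural recursion over the board's rows; objective: alternative decomposition.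


-- ===== PORT A =====
def obtem_coluna (tabuleiro : List (List Int)) (posicao : Int) : List Int :=
  let m : Int := tabuleiro.length
  let n : Int := (tabuleiro.headD []).length  -- tabuleiro[0]; Pre_ excludes the empty board where Python raises IndexError
  let indice_coluna : Int := if posicao > m then posicao - n else posicao
  let coluna : List Int := [indice_coluna]
  (PySem.List.pyRange 0 (m - 1) 1).foldl
    (fun coluna valor => coluna ++ [PySem.List.pyGetD coluna valor 0 + n]) coluna

-- ===== PORT B =====
-- helper `resto`: one output index per remaining row, threading the current index
def pvResto (n : Int) : List (List Int) → Int → List Int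
  | [], _ => []
  | _ :: linhas, indice => indice :: pvResto n linhas (indice + n)

def obtem_coluna_alt (tabuleiro : List (List Int)) (posicao : Int) : List Int :=
  let n : Int := (tabuleiro.headD []).length  -- tabuleiro[0]; Pre_ excludes the empty board where Python raises IndexError
  let inicio : Int := if posicao > (tabuleiro.length : Int) then posicao - n else posicao
  pvResto n tabuleiro inicio

-- ===== PRECONDITION & SPEC =====
-- Both Pythons raise IndexError on the empty board (len(tabuleiro[0])); Pre_ excludes exactly that.
def Pre_obtem_coluna (tabuleiro : List (List Int)) (posicao : Int) : Prop := tabuleiro ≠ []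
instance (tabuleiro : List (List Int)) (posicao : Int) : Decidable (Pre_obtem_coluna tabuleiro posicao) := by unfold Pre_obtem_coluna; infer_instance
def pvWitness_obtem_coluna : List (List Int) × Int := ([[0, 1], [1, 0]], 2)

def Spec_obtem_coluna (tabuleiro : List (List Int)) (posicao : Int) (out : List Int) : Prop := out = obtem_coluna_alt tabuleiro posicao
instance (tabuleiro : List (List Int)) (posicao : Int) (out : List Int) : Decidable (Spec_obtem_coluna tabuleiro posicao out) := by unfold Spec_obtem_coluna; infer_instance

-- ===== CLAIM =====
def Claim_equal_obtem_coluna : Prop := ∀ (tabuleiro : List (List Int)) (posicao : Int), Dom_obtem_coluna tabuleiro posicao → Pre_obtem_coluna tabuleiro posicao → Spec_obtem_coluna tabuleiro posicao (obtem_coluna tabuleiro posicao)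

-- ===== LEMMAS AND PROOFS =====

-- B's row recursion in closed form: one term c + i*n per row index i.
theorem pvResto_eq_map (n : Int) (rows : List (List Int)) :
    ∀ c : Int, pvResto n rows c = (List.range rows.length).map (fun i : Nat => c + (i : Int) * n) := by
  induction rows with
  | nil => intro c; simp [pvResto]
  | cons r rows ih =>
      intro c
      simp only [pvResto, List.length_cons, List.range_succ_eq_map, List.map_cons,
        List.map_map, ih (c + n)]
      refine List.cons_eq_cons.mpr ⟨by push_cast; ring, ?_⟩
      apply List.map_congr_left
      intro i _
      simp only [Function.comp_apply]
      push_cast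
      ring

-- A's accumulator loop starting from [c] after k steps, in the same closed form.
theorem pv_loop_eq (n c : Int) (k : Nat) :
    (PySem.List.pyRange 0 k 1).foldl
      (fun acc v => acc ++ [PySem.List.pyGetD acc v 0 + n]) [c]
    = (List.range (k + 1)).map (fun i : Nat => c + (i : Int) * n) := by
  induction k with
  | zero =>
      rw [show ((0 : Nat) : Int) = 0 by norm_num, PySem.List.pyRange_one_eq_nil le_rfl]
      simp
  | succ k ih =>
      have hsplit : PySem.List.pyRange 0 ((k : Int) + 1) 1
          = PySem.List.pyRange 0 (k : Int) 1 ++ [(k : Int)] :=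
        PySem.List.pyRange_one_succ_right (by exact_mod_cast Nat.zero_le k)
      have hget : PySem.List.pyGetD
          ((List.range (k + 1)).map (fun i : Nat => c + (i : Int) * n)) (k : Int) 0
          = c + (k : Int) * n := by
        rw [PySem.List.pyGetD_natCast]
        simp [List.getD]
      push_cast
      rw [hsplit, List.foldl_append, ih]
      simp only [List.foldl_cons, List.foldl_nil, hget]
      rw [List.range_succ, List.range_succ, List.map_append, List.map_append,
        List.range_succ, List.map_append]
      simp only [List.map_cons, List.map_nil, List.append_assoc, List.cons_append,
        List.nil_append, List.append_cancel_left_eq, List.cons.injEq, and_true, true_and]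
      push_cast
      ring

-- ===== VERDICT =====
theorem obtem_coluna_spec : Claim_equal_obtem_coluna := by
  intro tabuleiro posicao _ hpre
  unfold Spec_obtem_coluna obtem_coluna obtem_coluna_alt
  simp only []
  rw [pvResto_eq_map]
  have hlen : tabuleiro.length = (tabuleiro.length - 1) + 1 :=
    (Nat.succ_pred_eq_of_pos (List.length_pos_of_ne_nil hpre)).symm
  have hm1 : (tabuleiro.length : Int) - 1 = ((tabuleiro.length - 1 : Nat) : Int) := by
    have := List.length_pos_of_ne_nil hpre; omega
  rw [hm1, pv_loop_eq]
  rw [← hlen]
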